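-- pv_equiv track=rewrite | github.com/deividedc/Computacao_Evolucionista | Trabalho 4/drawer/iberamia_analysis_v_0p5.py | rf_map
-- ===== SOURCE A (Python) =====
-- def rf_map(s):
--     x=['O']*4
--     for i in list(s):
--         if i=='linear':
--             x[0]='1'
--         if i=='linear_cov':
--             x[1]='1'
--         if i=='quadratic':
--             x[2]='1'
--         if i=='cubic':
--             x[3]='1'
--
--     return ''.join([str(i) for i in x])
-- ===== SOURCE B (Python) =====
-- def rf_map(s):
--     present = set(s)
--     return ''.join('1' if t in present else 'O'
--                    for t in ['linear', 'linear_cov', 'quadratic', 'cubic'])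
-- ===== Notes on version B (the rewrite author's own statement) =====
-- stated objective: idiomatic
-- what changed: Instead of scanning the input with four branches mutating a flag array, B builds a set of the input once and maps the fixed four terms to '1'/'O' by membership, joining the result.
import Mathlib
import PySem

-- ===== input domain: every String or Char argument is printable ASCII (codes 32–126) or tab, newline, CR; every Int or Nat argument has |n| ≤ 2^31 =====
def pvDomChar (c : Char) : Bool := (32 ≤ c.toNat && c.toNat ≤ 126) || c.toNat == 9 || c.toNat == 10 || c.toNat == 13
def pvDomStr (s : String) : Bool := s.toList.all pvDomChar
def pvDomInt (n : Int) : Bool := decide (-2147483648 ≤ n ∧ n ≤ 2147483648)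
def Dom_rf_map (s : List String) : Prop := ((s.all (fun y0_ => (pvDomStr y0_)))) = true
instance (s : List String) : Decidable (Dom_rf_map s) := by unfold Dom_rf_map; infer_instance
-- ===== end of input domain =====

-- B replaces A's scan-with-four-branches over the input by one membership query per fixed term (idiomatic; same cost).

-- ===== PORT A =====
-- A's loop body: the mutable 4-element list x is a 4-tuple, the four ifs in A's order
def rfStep (x : String × String × String × String) (i : String) : String × String × String × String :=
  let x := if i == "linear" then ("1", x.2.1, x.2.2.1, x.2.2.2) else x
  let x := if i == "linear_cov" then (x.1, "1", x.2.2.1, x.2.2.2) else x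
  let x := if i == "quadratic" then (x.1, x.2.1, "1", x.2.2.2) else x
  let x := if i == "cubic" then (x.1, x.2.1, x.2.2.1, "1") else x
  x

def rf_map (s : List String) : String :=
  let x := s.foldl rfStep ("O", "O", "O", "O")
  PySem.Str.join "" [x.1, x.2.1, x.2.2.1, x.2.2.2]

-- ===== PORT B =====
def rf_map_alt (s : List String) : String :=
  let present := PySem.Set.ofList s
  PySem.Str.join ""
    ((["linear", "linear_cov", "quadratic", "cubic"]).map
      (fun t => if PySem.Set.contains present t then "1" else "O"))

-- ===== PRECONDITION & SPEC =====
def Spec_rf_map (s : List String) (out : String) : Prop := out = rf_map_alt s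
instance (s : List String) (out : String) : Decidable (Spec_rf_map s out) := by unfold Spec_rf_map; infer_instance

-- ===== CLAIM (what is proved, stated in full; the proofs are below) =====
def Claim_equal_rf_map : Prop := ∀ (s : List String), Dom_rf_map s → Spec_rf_map s (rf_map s)

-- ===== LEMMAS AND PROOFS =====

-- one flag cell: set by the head or by the tail iff its term occurs in the whole list
theorem flag_aux (hd v a : String) (t : List String) :
    (if v ∈ t then "1" else if (hd == v) = true then "1" else a)
      = if v = hd ∨ v ∈ t then "1" else a := by
  by_cases h1 : v ∈ t
  · simp [h1]
  · by_cases h2 : v = hd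
    · subst h2; simp [h1]
    · simp [h1, h2, show (hd == v) = false from beq_eq_false_iff_ne.mpr (fun e => h2 e.symm)]

-- each component of A's fold: '1' exactly when its term occurs in s (else the initial value)
theorem rf_fold_components (s : List String) (a b c d : String) :
    s.foldl rfStep (a, b, c, d) =
      ((if "linear" ∈ s then "1" else a),
       (if "linear_cov" ∈ s then "1" else b),
       (if "quadratic" ∈ s then "1" else c),
       (if "cubic" ∈ s then "1" else d)) := by
  induction s generalizing a b c d with
  | nil => simp
  | cons h t ih =>
    simp only [List.foldl_cons, List.mem_cons]
    rw [show rfStep (a, b, c, d) h =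
        ((if (h == "linear") = true then "1" else a),
         (if (h == "linear_cov") = true then "1" else b),
         (if (h == "quadratic") = true then "1" else c),
         (if (h == "cubic") = true then "1" else d)) by
      simp only [rfStep]; split_ifs <;> rfl]
    rw [ih]
    simp only [flag_aux]

-- ===== VERDICT (by name: the statement is the Claim_ definition above) =====
theorem rf_map_spec : Claim_equal_rf_map := by
  intro s _
  unfold Spec_rf_map rf_map rf_map_alt
  rw [rf_fold_components]
  simp only [List.map, PySem.Set.contains_eq_listContains, List.contains_iff_mem,
    PySem.Set.mem_ofList]
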